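-- pv_equiv track=rewrite | github.com/colby72/taltech_labs | cryptography/assign1/breakVigenere.py | freqDouble
-- ===== SOURCE A (Python) =====
-- def testDouble(cryptogram):
--     doubles = []
--     done = []
--     for i in range(len(cryptogram)-1):
--         if (cryptogram[i]==cryptogram[i+1]) and (cryptogram[i] not in done):
--             doubles.append((cryptogram[i],i))
--             done.append(cryptogram[i])
--     return doubles
--
-- def freqDouble(cryptogram):
--     freqs = []
--     done = []
--     doubles = testDouble(cryptogram)
--     for d in doubles:
--         if d[0] in done:
--             pass
--         s = d[0]*2
--         parts = cryptogram.split(s)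
--         freq = []
--         for p in parts:
--             freq.append(len(p))
--         freqs.append((d[0], freq))
--         done.append(d[0])
--     return freqs
-- ===== SOURCE B (Python) =====
-- def _part_lengths(s, c):
--     # lengths of the pieces of s split by the non-overlapping separator c+c
--     lens = []
--     cur = 0
--     i = 0
--     n = len(s)
--     while i + 1 < n:
--         if s[i] == c and s[i + 1] == c:
--             lens.append(cur)
--             cur = 0
--             i += 2
--         else:
--             cur += 1
--             i += 1
--     lens.append(cur + (n - i))
--     return lens
--
--
-- def freqDouble(cryptogram):
--     order = []
--     for x, y in zip(cryptogram, cryptogram[1:]):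
--         if x == y and x not in order:
--             order.append(x)
--     return [(c, _part_lengths(cryptogram, c)) for c in order]
-- ===== Notes on version B (the rewrite author's own statement) =====
-- stated objective: alternative
-- what changed: B replaces A's two index loops plus a full str.split pass per doubled character by one adjacent-pair scan that collects the doubled characters and a direct recursive scan computing the non-overlapping part lengths without building the substrings.
import Mathlib
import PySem

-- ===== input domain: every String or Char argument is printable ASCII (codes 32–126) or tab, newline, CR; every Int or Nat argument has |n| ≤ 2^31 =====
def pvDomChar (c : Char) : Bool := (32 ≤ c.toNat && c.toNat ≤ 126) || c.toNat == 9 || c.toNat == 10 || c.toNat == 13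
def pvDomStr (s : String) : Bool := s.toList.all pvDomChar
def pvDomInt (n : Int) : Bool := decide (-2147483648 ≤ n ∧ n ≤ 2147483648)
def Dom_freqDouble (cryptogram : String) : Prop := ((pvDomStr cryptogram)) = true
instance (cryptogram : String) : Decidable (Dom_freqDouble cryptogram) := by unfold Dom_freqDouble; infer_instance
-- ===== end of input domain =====

-- B replaces A's per-character str.split passes by one adjacent-pair scan collecting the
-- doubled characters plus a direct recursive computation of the non-overlapping part lengths
-- (objective: alternative decomposition, no repeated split over the whole string).

-- ===== PORT A =====
-- helper: testDouble(cryptogram) — index loop over range(len-1), state (doubles, done)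
def pvTestDouble (cs : List Char) : List (Char × Int) :=
  (List.foldl
    (fun (st : List (Char × Int) × List Char) (i : Int) =>
      if PySem.List.pyGetD cs i ' ' = PySem.List.pyGetD cs (i + 1) ' ' ∧
         PySem.List.pyGetD cs i ' ' ∉ st.2
      then (st.1 ++ [(PySem.List.pyGetD cs i ' ', i)], st.2 ++ [PySem.List.pyGetD cs i ' '])
      else st)
    ([], [])
    (PySem.List.pyRange 0 ((cs.length : Int) - 1))).1

-- freqDouble: loop over testDouble's pairs; 'if d[0] in done: pass' is a no-op and ports to nothing;
-- d[0]*2 is the two-character separator [d.1, d.1]; cryptogram.split(s) is PySem.Chars.splitOn (sep ≠ "").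
def freqDouble (cryptogram : String) : List (String × List Int) :=
  let cs := cryptogram.toList
  (List.foldl
    (fun (st : List (String × List Int) × List Char) (d : Char × Int) =>
      let parts := PySem.Chars.splitOn cs [d.1, d.1]
      let freq := List.foldl (fun (acc : List Int) (p : List Char) => acc ++ [(p.length : Int)]) [] parts
      (st.1 ++ [(String.ofList [d.1], freq)], st.2 ++ [d.1]))
    ([], [])
    (pvTestDouble cs)).1

-- ===== PORT B =====
-- helper: _part_lengths(s, c) — while loop over s, consuming cc separators non-overlappingly
def pvPartLengths (c : Char) : Int → List Char → List Int
  | cur, x :: y :: rest =>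
      if x = c ∧ y = c then cur :: pvPartLengths c 0 rest
      else pvPartLengths c (cur + 1) (y :: rest)
  | cur, l => [cur + l.length]   -- tail: cur + (n - i) remaining characters (0 or 1 here)
  termination_by _ l => l.length

def freqDouble_alt (cryptogram : String) : List (String × List Int) :=
  let cs := cryptogram.toList
  let order := List.foldl
    (fun (order : List Char) (p : Char × Char) =>
      if p.1 = p.2 ∧ p.1 ∉ order then order ++ [p.1] else order)
    [] (cs.zip cs.tail)
  order.map (fun c => (String.ofList [c], pvPartLengths c 0 cs))

-- ===== PRECONDITION & SPEC =====
def Spec_freqDouble (cryptogram : String) (out : List (String × List Int)) : Prop := out = freqDouble_alt cryptogram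
instance (cryptogram : String) (out : List (String × List Int)) : Decidable (Spec_freqDouble cryptogram out) := by unfold Spec_freqDouble; infer_instance

-- ===== CLAIM (what is proved, stated in full; the proofs are below) =====
def Claim_equal_freqDouble : Prop := ∀ (cryptogram : String), Dom_freqDouble cryptogram → Spec_freqDouble cryptogram (freqDouble cryptogram)

-- ===== LEMMAS AND PROOFS =====

-- the split-by-cc part lengths computed by A's splitOn equal B's direct scan
theorem map_len_go (c : Char) : ∀ (fuel : Nat) (l cur : List Char) (acc : List (List Char)), l.length < fuel →
    (PySem.Chars.splitOn.go [c, c] fuel l cur acc).map (fun p => (p.length : Int))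
      = acc.reverse.map (fun p => (p.length : Int)) ++ pvPartLengths c (cur.length : Int) l := by
  intro fuel
  induction fuel with
  | zero => intro l cur acc h; exact absurd h (Nat.not_lt_zero _)
  | succ fuel ih =>
    intro l cur acc h
    match l with
    | [] =>
      simp [PySem.Chars.splitOn.go, pvPartLengths]
    | [x] =>
      have hpre : ([c, c].isPrefixOf [x]) = false := by
        simp [List.isPrefixOf]
      rw [show PySem.Chars.splitOn.go [c, c] (fuel + 1) [x] cur acc
            = PySem.Chars.splitOn.go [c, c] fuel [] (x :: cur) acc by
        simp [PySem.Chars.splitOn.go, hpre]]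
      rw [ih [] (x :: cur) acc (by simp at h ⊢; omega)]
      simp [pvPartLengths]
    | x :: y :: rest =>
      by_cases hc : x = c ∧ y = c
      · have hpre : ([c, c].isPrefixOf (x :: y :: rest)) = true := by
          simp [List.isPrefixOf, hc.1, hc.2]
        rw [show PySem.Chars.splitOn.go [c, c] (fuel + 1) (x :: y :: rest) cur acc
              = PySem.Chars.splitOn.go [c, c] fuel rest [] (cur.reverse :: acc) by
          simp [PySem.Chars.splitOn.go, hpre]]
        rw [ih rest [] (cur.reverse :: acc) (by simp at h ⊢; omega)]
        simp [pvPartLengths, hc.1, hc.2]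
      · have hpre : ([c, c].isPrefixOf (x :: y :: rest)) = false := by
          by_contra hne
          simp [List.isPrefixOf] at hne
          exact hc ⟨hne.1.symm, hne.2.symm⟩
        rw [show PySem.Chars.splitOn.go [c, c] (fuel + 1) (x :: y :: rest) cur acc
              = PySem.Chars.splitOn.go [c, c] fuel (y :: rest) (x :: cur) acc by
          simp [PySem.Chars.splitOn.go, hpre]]
        rw [ih (y :: rest) (x :: cur) acc (by simp at h ⊢; omega)]
        rw [show pvPartLengths c (cur.length : Int) (x :: y :: rest)
              = pvPartLengths c ((cur.length : Int) + 1) (y :: rest) by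
          simp [pvPartLengths, hc]]
        have harg : (((x :: cur).length : Nat) : Int) = (cur.length : Int) + 1 := by simp
        rw [harg]

theorem map_len_splitOn (c : Char) (cs : List Char) :
    (PySem.Chars.splitOn cs [c, c]).map (fun p => (p.length : Int)) = pvPartLengths c 0 cs := by
  unfold PySem.Chars.splitOn
  rw [map_len_go c (cs.length + 1) cs [] [] (by omega)]
  simp

-- the index-range fold equals the adjacent-pair fold, for any body reading only cs[i], cs[i+1]
theorem range_fold_eq_zip_fold {σ : Type} (cs : List Char) (f : σ → Char × Char → σ) (init : σ) :
    List.foldl (fun st (i : Int) => f st (PySem.List.pyGetD cs i ' ', PySem.List.pyGetD cs (i + 1) ' '))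
      init (PySem.List.pyRange 0 ((cs.length : Int) - 1))
      = List.foldl f init (cs.zip cs.tail) := by
  match hcs : cs with
  | [] => simp [PySem.List.pyRange]
  | a :: t =>
    have hlen : ((a :: t).length : Int) - 1 = ((t.length : Nat) : Int) := by simp
    rw [hlen, PySem.List.pyRange_zero_natCast, List.foldl_map]
    have hmap : (List.range t.length).map
        (fun (k : Nat) => (PySem.List.pyGetD (a :: t) (k : Int) ' ', PySem.List.pyGetD (a :: t) ((k : Int) + 1) ' '))
        = (a :: t).zip (a :: t).tail := by
      apply List.ext_getElem
      · simp
      · intro j h1 h2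
        have hj : j < t.length := by simpa using h1
        simp only [List.getElem_map, List.getElem_range, List.getElem_zip, List.tail_cons]
        rw [show ((j : Nat) : Int) + 1 = (((j + 1 : Nat)) : Int) by push_cast; ring,
            PySem.List.pyGetD_natCast, PySem.List.pyGetD_natCast,
            List.getD_eq_getElem _ _ (by simp; omega),
            List.getD_eq_getElem _ _ (by simp; omega)]
        simp
    rw [← hmap, List.foldl_map]

-- A's testDouble keeps done = doubles.map fst; projecting to first components gives B's order fold
theorem testDouble_fst_inv (cs : List Char) :
    ∀ (l : List Int) (ds : List (Char × Int)),
    ((List.foldl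
      (fun (st : List (Char × Int) × List Char) (i : Int) =>
        if PySem.List.pyGetD cs i ' ' = PySem.List.pyGetD cs (i + 1) ' ' ∧
           PySem.List.pyGetD cs i ' ' ∉ st.2
        then (st.1 ++ [(PySem.List.pyGetD cs i ' ', i)], st.2 ++ [PySem.List.pyGetD cs i ' '])
        else st)
      (ds, ds.map Prod.fst) l).1).map Prod.fst
    = List.foldl
      (fun (o : List Char) (i : Int) =>
        if PySem.List.pyGetD cs i ' ' = PySem.List.pyGetD cs (i + 1) ' ' ∧
           PySem.List.pyGetD cs i ' ' ∉ o
        then o ++ [PySem.List.pyGetD cs i ' '] else o)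
      (ds.map Prod.fst) l := by
  intro l
  induction l with
  | nil => intro ds; simp
  | cons i t ih =>
    intro ds
    by_cases hcond : PySem.List.pyGetD cs i ' ' = PySem.List.pyGetD cs (i + 1) ' ' ∧
        PySem.List.pyGetD cs i ' ' ∉ ds.map Prod.fst
    · simp only [List.foldl_cons, if_pos hcond]
      have : (ds ++ [(PySem.List.pyGetD cs i ' ', i)]).map Prod.fst
          = ds.map Prod.fst ++ [PySem.List.pyGetD cs i ' '] := by simp
      rw [← this, ih (ds ++ [(PySem.List.pyGetD cs i ' ', i)]), this]
    · simp only [List.foldl_cons, if_neg hcond]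
      exact ih ds

theorem testDouble_fst (cs : List Char) :
    (pvTestDouble cs).map Prod.fst
      = List.foldl
          (fun (order : List Char) (p : Char × Char) =>
            if p.1 = p.2 ∧ p.1 ∉ order then order ++ [p.1] else order)
          [] (cs.zip cs.tail) := by
  have h := testDouble_fst_inv cs (PySem.List.pyRange 0 ((cs.length : Int) - 1)) []
  simp only [List.map_nil] at h
  unfold pvTestDouble
  rw [h]
  exact range_fold_eq_zip_fold cs
    (fun (o : List Char) (p : Char × Char) => if p.1 = p.2 ∧ p.1 ∉ o then o ++ [p.1] else o) []

-- ===== VERDICT (by name: the statement is the Claim_ definition above) =====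
theorem freqDouble_spec : Claim_equal_freqDouble := by
  intro cryptogram _
  show freqDouble cryptogram = freqDouble_alt cryptogram
  unfold freqDouble freqDouble_alt
  show (List.foldl
      (fun (st : List (String × List Int) × List Char) (d : Char × Int) =>
        (st.1 ++ [(String.ofList [d.1],
           List.foldl (fun (acc : List Int) (p : List Char) => acc ++ [(p.length : Int)]) []
             (PySem.Chars.splitOn cryptogram.toList [d.1, d.1]))],
         st.2 ++ [d.1]))
      ([], []) (pvTestDouble cryptogram.toList)).1
    = (List.foldl (fun (order : List Char) (p : Char × Char) =>
          if p.1 = p.2 ∧ p.1 ∉ order then order ++ [p.1] else order)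
        [] (cryptogram.toList.zip cryptogram.toList.tail)).map
        (fun c => (String.ofList [c], pvPartLengths c 0 cryptogram.toList))
  rw [show (List.foldl
      (fun (st : List (String × List Int) × List Char) (d : Char × Int) =>
        (st.1 ++ [(String.ofList [d.1],
           List.foldl (fun (acc : List Int) (p : List Char) => acc ++ [(p.length : Int)]) []
             (PySem.Chars.splitOn cryptogram.toList [d.1, d.1]))],
         st.2 ++ [d.1]))
      ([], []) (pvTestDouble cryptogram.toList))
    = (List.foldl
        (fun (s : List (String × List Int)) (d : Char × Int) =>
          s ++ [(String.ofList [d.1],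
            List.foldl (fun (acc : List Int) (p : List Char) => acc ++ [(p.length : Int)]) []
              (PySem.Chars.splitOn cryptogram.toList [d.1, d.1]))])
        [] (pvTestDouble cryptogram.toList),
       List.foldl (fun (s : List Char) (d : Char × Int) => s ++ [d.1]) [] (pvTestDouble cryptogram.toList)) from
    PySem.List.foldl_prod_mk
      (fun (s : List (String × List Int)) (d : Char × Int) =>
        s ++ [(String.ofList [d.1],
          List.foldl (fun (acc : List Int) (p : List Char) => acc ++ [(p.length : Int)]) []
            (PySem.Chars.splitOn cryptogram.toList [d.1, d.1]))])
      (fun (s : List Char) (d : Char × Int) => s ++ [d.1])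
      (pvTestDouble cryptogram.toList) [] []]
  simp only [PySem.List.foldl_append_singleton_eq_map, List.nil_append]
  rw [← testDouble_fst cryptogram.toList, List.map_map]
  apply List.map_congr_left
  intro d _
  simp only [Function.comp]
  rw [map_len_splitOn d.1 cryptogram.toList]
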